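-- pv_equiv track=rewrite | github.com/tumblehead/TumblePipe | houdini/TumblePipe/python/1x/tumblehead/pipe/houdini/lops/export_render_layer.py | _sort_aov_names
-- ===== SOURCE A (Python) =====
-- def _sort_aov_names(aov_names):
--     beauty = None
--     lpes = []
--     mattes = []
--     mses = []
--     other = []
--     for aov_name in aov_names:
--         name = aov_name.lower()
--         if name == 'beauty': beauty = aov_name; continue
--         if name.endswith('_mse'): mses.append(aov_name); continue
--         if name.startswith('beauty_'): lpes.append(aov_name); continue
--         if name.startswith('objid_'): mattes.append(aov_name); continue
--         if name.startswith('holdout_'): mattes.append(aov_name); continue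
--         other.append(aov_name)
--     other.sort()
--     result = [] if beauty is None else [beauty]
--     result += lpes
--     result += mattes
--     result += mses
--     result += other
--     return result
-- ===== SOURCE B (Python) =====
-- def _sort_aov_names(aov_names):
--     beauty = None
--     for n in aov_names:
--         if n.lower() == 'beauty':
--             beauty = n
--     rest = [n for n in aov_names if n.lower() != 'beauty']
--
--     def rank(n):
--         m = n.lower()
--         if m.endswith('_mse'): return 3
--         if m.startswith('beauty_'): return 1
--         if m.startswith('objid_') or m.startswith('holdout_'): return 2
--         return 4
--
--     tail = sorted(rest, key=lambda n: (rank(n), n if rank(n) == 4 else ''))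
--     return ([beauty] if beauty is not None else []) + tail
-- ===== Notes on version B (the rewrite author's own statement) =====
-- stated objective: idiomatic
-- what changed: Replaced the five-bucket single-pass classification plus per-bucket concatenation by one stable sorted() call keyed by (precedence rank, name-if-other), with the exact 'beauty' slot pulled out separately.
import Mathlib
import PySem

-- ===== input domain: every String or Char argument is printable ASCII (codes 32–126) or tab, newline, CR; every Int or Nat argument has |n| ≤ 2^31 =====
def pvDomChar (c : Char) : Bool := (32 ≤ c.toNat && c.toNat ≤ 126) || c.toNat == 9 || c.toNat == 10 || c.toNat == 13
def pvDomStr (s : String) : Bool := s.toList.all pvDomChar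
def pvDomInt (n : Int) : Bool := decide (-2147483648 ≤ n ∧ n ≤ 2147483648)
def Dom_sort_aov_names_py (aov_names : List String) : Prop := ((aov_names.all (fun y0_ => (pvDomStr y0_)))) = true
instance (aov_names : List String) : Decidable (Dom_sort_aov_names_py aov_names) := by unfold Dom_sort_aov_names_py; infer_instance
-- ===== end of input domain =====

-- B replaces A's five-bucket single pass by one stable sorted() keyed by (precedence rank, name-if-other); same result, proved below.


-- ===== PORT A =====
-- loop body of A's single pass; state = (beauty, lpes, mattes, mses, other)
def pvStepA (st : Option String × List String × List String × List String × List String)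
    (aov_name : String) : Option String × List String × List String × List String × List String :=
  if PySem.Str.lower aov_name == "beauty" then (some aov_name, st.2.1, st.2.2.1, st.2.2.2.1, st.2.2.2.2)
  else if PySem.Str.endswith (PySem.Str.lower aov_name) "_mse" then (st.1, st.2.1, st.2.2.1, st.2.2.2.1 ++ [aov_name], st.2.2.2.2)
  else if PySem.Str.startswith (PySem.Str.lower aov_name) "beauty_" then (st.1, st.2.1 ++ [aov_name], st.2.2.1, st.2.2.2.1, st.2.2.2.2)
  else if PySem.Str.startswith (PySem.Str.lower aov_name) "objid_" then (st.1, st.2.1, st.2.2.1 ++ [aov_name], st.2.2.2.1, st.2.2.2.2)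
  else if PySem.Str.startswith (PySem.Str.lower aov_name) "holdout_" then (st.1, st.2.1, st.2.2.1 ++ [aov_name], st.2.2.2.1, st.2.2.2.2)
  else (st.1, st.2.1, st.2.2.1, st.2.2.2.1, st.2.2.2.2 ++ [aov_name])

def sort_aov_names_py (aov_names : List String) : List String :=
  let st := aov_names.foldl pvStepA (none, [], [], [], [])
  let other := PySem.List.sorted st.2.2.2.2 (fun x => x) false   -- other.sort()
  (match st.1 with | none => [] | some b => [b]) ++ st.2.1 ++ st.2.2.1 ++ st.2.2.2.1 ++ other

-- ===== PORT B =====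
-- B's rank(n): the same precedence A applies, as one function
def pvRank (n : String) : Nat :=
  if PySem.Str.endswith (PySem.Str.lower n) "_mse" then 3
  else if PySem.Str.startswith (PySem.Str.lower n) "beauty_" then 1
  else if PySem.Str.startswith (PySem.Str.lower n) "objid_" || PySem.Str.startswith (PySem.Str.lower n) "holdout_" then 2
  else 4

-- B's second key component: n if rank(n) == 4 else ''
def pvTag (n : String) : String := if pvRank n == 4 then n else ""

def sort_aov_names_py_alt (aov_names : List String) : List String :=
  let beauty := aov_names.foldl (fun b n => if PySem.Str.lower n == "beauty" then some n else b) none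
  let rest := aov_names.filter (fun n => !(PySem.Str.lower n == "beauty"))
  let tail := PySem.List.sorted2 rest (fun n => pvRank n) (fun n => pvTag n)
  (match beauty with | none => [] | some b => [b]) ++ tail

-- ===== PRECONDITION & SPEC =====
def Spec_sort_aov_names_py (aov_names : List String) (out : List String) : Prop := out = sort_aov_names_py_alt aov_names
instance (aov_names : List String) (out : List String) : Decidable (Spec_sort_aov_names_py aov_names out) := by unfold Spec_sort_aov_names_py; infer_instance

-- ===== CLAIM (what is proved, stated in full; the proofs are below) =====
def Claim_equal_sort_aov_names_py : Prop := ∀ (aov_names : List String), Dom_sort_aov_names_py aov_names → Spec_sort_aov_names_py aov_names (sort_aov_names_py aov_names)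

-- ===== LEMMAS AND PROOFS =====

-- A's cascade as a classification: 0 = beauty, 1 = lpe, 2 = matte, 3 = mse, 4 = other
def pvClass (n : String) : Nat :=
  if PySem.Str.lower n == "beauty" then 0
  else if PySem.Str.endswith (PySem.Str.lower n) "_mse" then 3
  else if PySem.Str.startswith (PySem.Str.lower n) "beauty_" then 1
  else if PySem.Str.startswith (PySem.Str.lower n) "objid_" then 2
  else if PySem.Str.startswith (PySem.Str.lower n) "holdout_" then 2
  else 4

theorem pvClass_le_four (n : String) : pvClass n ≤ 4 := by
  unfold pvClass; split_ifs <;> omega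

theorem pvRank_eq_pvClass {n : String} (h : pvClass n ≠ 0) : pvRank n = pvClass n := by
  unfold pvClass at *; unfold pvRank
  split_ifs at * <;> simp_all

theorem pvClass_eq_zero_iff (n : String) : pvClass n = 0 ↔ (PySem.Str.lower n == "beauty") = true := by
  unfold pvClass; split_ifs with h <;> simp_all

theorem pvTag_of_lt_four {n : String} (h1 : 1 ≤ pvClass n) (h2 : pvClass n ≤ 3) : pvTag n = "" := by
  unfold pvTag
  rw [pvRank_eq_pvClass (by omega)]
  have : ¬ (pvClass n == 4) = true := by simp; omega
  simp [this]

theorem pvTag_of_four {n : String} (h : pvClass n = 4) : pvTag n = n := by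
  unfold pvTag
  rw [pvRank_eq_pvClass (by omega), h]
  simp

-- insertBy facts specific to this proof
theorem pvInsert_cons {α : Type} (before : α → α → Bool) (x y : α) (ys : List α) :
    PySem.List.insertBy before x (y :: ys) =
      if before x y then x :: y :: ys else y :: PySem.List.insertBy before x ys := rfl

theorem pvInsert_append_left {α : Type} (before : α → α → Bool) (x : α) (pre post : List α)
    (h : ∀ y ∈ pre, before x y = false) :
    PySem.List.insertBy before x (pre ++ post) = pre ++ PySem.List.insertBy before x post := by
  induction pre with
  | nil => simp
  | cons y ys ih =>
      have hy := h y (by simp)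
      simp [pvInsert_cons, hy, ih (fun z hz => h z (by simp [hz]))]

theorem pvInsert_all_before {α : Type} (before : α → α → Bool) (x : α) (ys : List α)
    (h : ∀ y ∈ ys, before x y = true) :
    PySem.List.insertBy before x ys = x :: ys := by
  cases ys with
  | nil => rfl
  | cons y ys => simp [pvInsert_cons, h y (by simp)]

theorem pvInsert_congr {α : Type} (b b' : α → α → Bool) (x : α) (ys : List α)
    (h : ∀ y ∈ ys, b x y = b' x y) :
    PySem.List.insertBy b x ys = PySem.List.insertBy b' x ys := by
  induction ys with
  | nil => rfl
  | cons y ys ih =>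
      simp only [pvInsert_cons, h y (by simp)]
      rw [ih (fun z hz => h z (by simp [hz]))]

-- the comparison B's sorted2 uses
def pvBefore (a b : String) : Bool :=
  decide (pvRank a < pvRank b) || (!decide (pvRank b < pvRank a) && decide (pvTag a < pvTag b))

theorem pvSorted2_eq_foldl (xs : List String) :
    PySem.List.sorted2 xs (fun n => pvRank n) (fun n => pvTag n) =
      xs.foldl (fun acc x => PySem.List.insertBy pvBefore x acc) [] := rfl

-- filters by class
def pvF (i : Nat) (xs : List String) : List String := xs.filter (fun n => pvClass n == i)

theorem pvMem_pvF {i : Nat} {xs : List String} {y : String} (h : y ∈ pvF i xs) : pvClass y = i := by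
  unfold pvF at h
  have := (List.mem_filter.mp h).2
  simpa using this

theorem pvBefore_false_of_lt {x y : String} (hx : 1 ≤ pvClass x) (hy : 1 ≤ pvClass y)
    (hlt : pvClass y < pvClass x) : pvBefore x y = false := by
  unfold pvBefore
  rw [pvRank_eq_pvClass (show pvClass x ≠ 0 by omega), pvRank_eq_pvClass (show pvClass y ≠ 0 by omega)]
  simp
  exact ⟨by omega, fun h => absurd h (by omega)⟩

theorem pvBefore_false_of_eq_le {x y : String} (hx : 1 ≤ pvClass x) (hx3 : pvClass x ≤ 3)
    (heq : pvClass y = pvClass x) : pvBefore x y = false := by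
  unfold pvBefore
  rw [pvRank_eq_pvClass (show pvClass x ≠ 0 by omega), pvRank_eq_pvClass (show pvClass y ≠ 0 by omega),
      pvTag_of_lt_four hx hx3, pvTag_of_lt_four (by omega) (by omega)]
  simp [heq]

theorem pvBefore_true_of_gt {x y : String} (hx : 1 ≤ pvClass x) (hy : 1 ≤ pvClass y)
    (hlt : pvClass x < pvClass y) : pvBefore x y = true := by
  unfold pvBefore
  rw [pvRank_eq_pvClass (show pvClass x ≠ 0 by omega), pvRank_eq_pvClass (show pvClass y ≠ 0 by omega)]
  simp [hlt]

theorem pvBefore_of_four {x y : String} (hx : pvClass x = 4) (hy : pvClass y = 4) :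
    pvBefore x y = decide (x < y) := by
  unfold pvBefore
  rw [pvRank_eq_pvClass (show pvClass x ≠ 0 by omega), pvRank_eq_pvClass (show pvClass y ≠ 0 by omega),
      pvTag_of_four hx, pvTag_of_four hy, hx, hy]
  simp

-- the decomposition of B's single stable sort into A's buckets
theorem pvSortedDecomp (xs : List String) :
    PySem.List.sorted2 (xs.filter (fun n => !(PySem.Str.lower n == "beauty")))
        (fun n => pvRank n) (fun n => pvTag n) =
      pvF 1 xs ++ pvF 2 xs ++ pvF 3 xs ++ PySem.List.sorted (pvF 4 xs) (fun x => x) false := by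
  induction xs using List.reverseRecOn with
  | nil => simp [pvF, pvSorted2_eq_foldl]; rfl
  | append_singleton xs x ih =>
      by_cases h0 : pvClass x = 0
      · have hb : (!(PySem.Str.lower x == "beauty")) = false := by
          simp [(pvClass_eq_zero_iff x).mp h0]
        have hf : ∀ i, i ≠ 0 → pvF i (xs ++ [x]) = pvF i xs := by
          intro i hi
          unfold pvF
          simp [List.filter_append, h0, Ne.symm hi]
        rw [List.filter_append, hf 1 (by omega), hf 2 (by omega), hf 3 (by omega), hf 4 (by omega)]
        simpa [hb] using ih
      · have hb : (!(PySem.Str.lower x == "beauty")) = true := by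
          simp [pvClass_eq_zero_iff] at *; omega
        have hF : ∀ i, pvF i (xs ++ [x]) = pvF i xs ++ if pvClass x == i then [x] else [] := by
          intro i; unfold pvF; simp [List.filter_append, List.filter_cons]
        rw [pvSorted2_eq_foldl, List.filter_append, List.foldl_append, ← pvSorted2_eq_foldl, ih]
        simp only [List.filter_cons, hb, List.filter_nil, if_true, List.foldl_cons, List.foldl_nil]
        have h4 := pvClass_le_four x
        have hmemS : ∀ y ∈ PySem.List.sorted (pvF 4 xs) (fun x => x) false, pvClass y = 4 := by
          intro y hy
          exact pvMem_pvF (by simpa [PySem.List.mem_sorted] using hy)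
        interval_cases hc : pvClass x
        · omega
        · -- class 1: skip F1 (equal), insert before everything after
          rw [List.append_assoc, List.append_assoc,
              pvInsert_append_left _ _ _ _ (fun y hy => pvBefore_false_of_eq_le (by omega) (by omega) (by rw [pvMem_pvF hy, hc])),
              pvInsert_all_before _ _ _ (fun y hy => by
                rcases List.mem_append.mp hy with h | h
                · exact pvBefore_true_of_gt (by omega) (by have := pvMem_pvF h; omega) (by have := pvMem_pvF h; omega)
                · rcases List.mem_append.mp h with h | h
                  · exact pvBefore_true_of_gt (by omega) (by have := pvMem_pvF h; omega) (by have := pvMem_pvF h; omega)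
                  · exact pvBefore_true_of_gt (by omega) (by have := hmemS y h; omega) (by have := hmemS y h; omega))]
          rw [hF 1, hF 2, hF 3, hF 4]
          simp
        · -- class 2
          rw [List.append_assoc, List.append_assoc, ← List.append_assoc (pvF 1 xs),
              pvInsert_append_left _ _ _ _ (fun y hy => by
                rcases List.mem_append.mp hy with h | h
                · exact pvBefore_false_of_lt (by omega) (by have := pvMem_pvF h; omega) (by have := pvMem_pvF h; omega)
                · exact pvBefore_false_of_eq_le (by omega) (by omega) (by rw [pvMem_pvF h, hc])),
              pvInsert_all_before _ _ _ (fun y hy => by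
                rcases List.mem_append.mp hy with h | h
                · exact pvBefore_true_of_gt (by omega) (by have := pvMem_pvF h; omega) (by have := pvMem_pvF h; omega)
                · exact pvBefore_true_of_gt (by omega) (by have := hmemS y h; omega) (by have := hmemS y h; omega))]
          rw [hF 1, hF 2, hF 3, hF 4]
          simp
        · -- class 3
          rw [List.append_assoc, List.append_assoc, ← List.append_assoc (pvF 1 xs), ← List.append_assoc (pvF 1 xs ++ pvF 2 xs),
              pvInsert_append_left _ _ _ _ (fun y hy => by
                rcases List.mem_append.mp hy with h | h
                · rcases List.mem_append.mp h with h | h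
                  · exact pvBefore_false_of_lt (by omega) (by have := pvMem_pvF h; omega) (by have := pvMem_pvF h; omega)
                  · exact pvBefore_false_of_lt (by omega) (by have := pvMem_pvF h; omega) (by have := pvMem_pvF h; omega)
                · exact pvBefore_false_of_eq_le (by omega) (by omega) (by rw [pvMem_pvF h, hc])),
              pvInsert_all_before _ _ _ (fun y hy =>
                pvBefore_true_of_gt (by omega) (by have := hmemS y hy; omega) (by have := hmemS y hy; omega))]
          rw [hF 1, hF 2, hF 3, hF 4]
          simp
        · -- class 4: lands in the sorted tail
          rw [List.append_assoc, List.append_assoc, ← List.append_assoc (pvF 1 xs), ← List.append_assoc (pvF 1 xs ++ pvF 2 xs),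
              pvInsert_append_left _ _ _ _ (fun y hy => by
                rcases List.mem_append.mp hy with h | h
                · rcases List.mem_append.mp h with h | h
                  · exact pvBefore_false_of_lt (by omega) (by have := pvMem_pvF h; omega) (by have := pvMem_pvF h; omega)
                  · exact pvBefore_false_of_lt (by omega) (by have := pvMem_pvF h; omega) (by have := pvMem_pvF h; omega)
                · exact pvBefore_false_of_lt (by omega) (by have := pvMem_pvF h; omega) (by have := pvMem_pvF h; omega)),
              pvInsert_congr _ (fun a b => decide (a < b)) _ _ (fun y hy => by
                rw [pvBefore_of_four hc (hmemS y hy)])]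
          rw [hF 1, hF 2, hF 3, hF 4]
          have : PySem.List.sorted (pvF 4 xs ++ [x]) (fun x => x) false =
              PySem.List.insertBy (fun a b => decide (a < b)) x (PySem.List.sorted (pvF 4 xs) (fun x => x) false) := by
            rw [PySem.List.sorted_eq_foldl_insertBy, PySem.List.sorted_eq_foldl_insertBy, List.foldl_append]
            rfl
          simp [this]

-- A's fold computes last-beauty plus the four class filters
theorem pvLower_ne_beauty {x : String} (h : pvClass x ≠ 0) :
    (PySem.Str.lower x == "beauty") = false := by
  cases hq : (PySem.Str.lower x == "beauty")
  · rfl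
  · exact absurd ((pvClass_eq_zero_iff x).mpr hq) h

-- A's cascade, one branch per class
theorem pvStepA_class (st : Option String × List String × List String × List String × List String)
    (x : String) :
    pvStepA st x =
      (if pvClass x = 0 then some x else st.1,
       if pvClass x = 1 then st.2.1 ++ [x] else st.2.1,
       if pvClass x = 2 then st.2.2.1 ++ [x] else st.2.2.1,
       if pvClass x = 3 then st.2.2.2.1 ++ [x] else st.2.2.2.1,
       if pvClass x = 4 then st.2.2.2.2 ++ [x] else st.2.2.2.2) := by
  unfold pvStepA pvClass
  split_ifs <;> simp_all

-- A's fold computes last-beauty plus the four class filters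
theorem pvFoldA (xs : List String) (b : Option String) (l1 l2 l3 l4 : List String) :
    xs.foldl pvStepA (b, l1, l2, l3, l4) =
      (xs.foldl (fun bb n => if PySem.Str.lower n == "beauty" then some n else bb) b,
       l1 ++ pvF 1 xs, l2 ++ pvF 2 xs, l3 ++ pvF 3 xs, l4 ++ pvF 4 xs) := by
  induction xs generalizing b l1 l2 l3 l4 with
  | nil => simp [pvF]
  | cons x xs ih =>
      have hF : ∀ i, pvF i (x :: xs) = (if pvClass x == i then [x] else []) ++ pvF i xs := by
        intro i; unfold pvF; rw [List.filter_cons]; split_ifs <;> simp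
      simp only [List.foldl_cons]
      rw [pvStepA_class]
      have h4 := pvClass_le_four x
      interval_cases hc : pvClass x
      · have hb : (PySem.Str.lower x == "beauty") = true := (pvClass_eq_zero_iff x).mp hc
        simp [hF, hb]; rw [ih]; simp
      · have hb := pvLower_ne_beauty (x := x) (by omega)
        simp [hF, hb]; rw [ih]; simp
      · have hb := pvLower_ne_beauty (x := x) (by omega)
        simp [hF, hb]; rw [ih]; simp
      · have hb := pvLower_ne_beauty (x := x) (by omega)
        simp [hF, hb]; rw [ih]; simp
      · have hb := pvLower_ne_beauty (x := x) (by omega)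
        simp [hF, hb]; rw [ih]; simp

-- ===== VERDICT (by name: the statement is the Claim_ definition above) =====
theorem sort_aov_names_py_spec : Claim_equal_sort_aov_names_py := by
  intro aov_names _
  unfold Spec_sort_aov_names_py sort_aov_names_py sort_aov_names_py_alt
  dsimp only
  rw [pvFoldA, pvSortedDecomp]
  cases List.foldl (fun bb n => if (PySem.Str.lower n == "beauty") = true then some n else bb) none aov_names <;>
    simp [List.append_assoc]
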